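-- pv_equiv track=rewrite | github.com/simulateconditions/VT-LTC-Survey-Analysis | SRC 2/surveys aug 28/VTSurveyProject/survey_text_analysis.py | get_pin_count
-- ===== SOURCE A (Python) =====
-- def get_pin_count(d):
-- 	d = d["Facility Name"]
-- 	missing = 0
-- 	there = 0
-- 	for facility in d:
-- 		if d[facility]=='?': missing += 1
-- 		else: there += 1
-- 	return (there,missing)
-- ===== SOURCE B (Python) =====
-- def get_pin_count(d):
--     vals = list(d["Facility Name"].values())
--
--     def missing(lo, hi):
--         # divide-and-conquer count of '?' in vals[lo:hi]
--         if hi - lo == 0: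
--             return 0
--         if hi - lo == 1:
--             return 1 if vals[lo] == '?' else 0
--         mid = (lo + hi) // 2
--         return missing(lo, mid) + missing(mid, hi)
--
--     m = missing(0, len(vals))
--     return (len(vals) - m, m)
-- ===== Notes on version B (the rewrite author's own statement) =====
-- stated objective: alternative
-- what changed: Replaces A's iterative dual-counter loop (which re-looks-up each key via d[facility]) by a divide-and-conquer recursion that counts only the '?' values over the value list, deriving the 'there' count arithmetically as len(vals) - missing instead of counting it.
import Mathlib
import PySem

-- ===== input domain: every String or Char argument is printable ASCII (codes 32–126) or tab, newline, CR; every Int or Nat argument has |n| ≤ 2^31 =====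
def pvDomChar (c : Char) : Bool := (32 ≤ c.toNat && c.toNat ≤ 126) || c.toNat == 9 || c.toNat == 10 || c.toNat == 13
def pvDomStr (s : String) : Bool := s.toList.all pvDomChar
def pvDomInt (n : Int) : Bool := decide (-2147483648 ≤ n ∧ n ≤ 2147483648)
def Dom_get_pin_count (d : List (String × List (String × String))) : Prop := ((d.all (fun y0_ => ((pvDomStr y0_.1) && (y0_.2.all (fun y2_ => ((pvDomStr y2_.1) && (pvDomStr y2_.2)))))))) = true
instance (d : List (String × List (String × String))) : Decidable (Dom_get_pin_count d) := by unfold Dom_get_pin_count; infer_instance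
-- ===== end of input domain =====

-- B replaces A's iterative dual-counter loop by a divide-and-conquer count of '?' values plus the arithmetic complement len - missing; return value only, no mutation.

-- ===== PORT A =====
-- A: sub = d["Facility Name"]; two counters; for each key, look the value up with sub[facility] and bump one counter.
def get_pin_count (d : List (String × List (String × String))) : Int × Int :=
  match List.lookup "Facility Name" d with
  | none => (0, 0)  -- Python raises KeyError here; excluded by Pre_get_pin_count
  | some sub =>
    sub.foldl
      (fun (acc : Int × Int) kv =>
        if List.lookup kv.1 sub = some "?" then (acc.1, acc.2 + 1) else (acc.1 + 1, acc.2))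
      (0, 0)

-- ===== PORT B =====
-- Source B's `missing(lo, hi)`: divide-and-conquer count of '?' in vals[lo:hi].
-- `fuel` is a totality guard only: each recursive call strictly shrinks the span hi-lo,
-- so fuel = vals.length always suffices for Source B's calls (span ≤ len, shrinks by ≥ 1 per level).
def pvMissing (vals : List String) : Nat → Int → Int → Int
  | 0, _, _ => 0
  | fuel + 1, lo, hi =>
    if hi - lo ≤ 0 then 0  -- Python tests `hi - lo == 0`; spans with hi < lo never arise in Source B's calls
    else if hi - lo = 1 then
      match PySem.List.pyGet? vals lo with
      | some v => if v = "?" then 1 else 0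
      | none => 0  -- IndexError in Python; unreachable for Source B's in-range calls
    else
      let mid := PySem.Int.floordiv (lo + hi) 2
      pvMissing vals fuel lo mid + pvMissing vals fuel mid hi

-- B: m = missing(0, len(vals)); return (len(vals) - m, m).
def get_pin_count_alt (d : List (String × List (String × String))) : Int × Int :=
  match List.lookup "Facility Name" d with
  | none => (0, 0)  -- KeyError in Python; excluded by Pre_get_pin_count
  | some sub =>
    let vals := sub.map Prod.snd
    let m := pvMissing vals vals.length 0 (vals.length : Int)
    ((vals.length : Int) - m, m)

-- ===== PRECONDITION & SPEC =====
-- Pre_ excludes inputs without a "Facility Name" key (Python A raises KeyError there) and inner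
-- association lists with duplicate keys, which do not encode any Python dict (a Python dict's keys are unique).
def Pre_get_pin_count (d : List (String × List (String × String))) : Prop :=
  (List.lookup "Facility Name" d).isSome = true ∧
  ((((List.lookup "Facility Name" d).getD []).map Prod.fst).Nodup)
instance (d : List (String × List (String × String))) : Decidable (Pre_get_pin_count d) := by unfold Pre_get_pin_count; infer_instance

def pvWitness_get_pin_count : (List (String × List (String × String))) :=
  [("Facility Name", [("a", "?"), ("b", "x")])]

def Spec_get_pin_count (d : List (String × List (String × String))) (out : Int × Int) : Prop := out = get_pin_count_alt d
instance (d : List (String × List (String × String))) (out : Int × Int) : Decidable (Spec_get_pin_count d out) := by unfold Spec_get_pin_count; infer_instance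

-- ===== CLAIM (what is proved, stated in full; the proofs are below) =====
def Claim_equal_get_pin_count : Prop := ∀ (d : List (String × List (String × String))), Dom_get_pin_count d → Pre_get_pin_count d → Spec_get_pin_count d (get_pin_count d)

-- ===== LEMMAS AND PROOFS =====

-- In an association list with distinct keys, the first match for a member's key is its own value.
theorem lookup_of_mem_nodup (sub : List (String × String)) (h : (sub.map Prod.fst).Nodup)
    (k : String) (v : String) (hm : (k, v) ∈ sub) : List.lookup k sub = some v := by
  induction sub with
  | nil => cases hm
  | cons hd tl ih =>
    simp only [List.map_cons, List.nodup_cons] at h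
    rcases List.mem_cons.mp hm with heq | hmem
    · subst heq; simp [List.lookup]
    · have hk : k ≠ hd.1 := by
        intro hk; exact h.1 (hk ▸ (List.mem_map.mpr ⟨(k, v), hmem, rfl⟩))
      have hb : (k == hd.1) = false := by simp [hk]
      simp only [List.lookup, hb]
      exact ih h.2 hmem

-- The divide-and-conquer count equals the number of '?' in the corresponding slice.
theorem pvMissing_eq (fuel : Nat) : ∀ (vals : List String) (lo hi : Int),
    (hi - lo).toNat ≤ fuel → 0 ≤ lo → hi ≤ (vals.length : Int) →
    pvMissing vals fuel lo hi
      = (((((vals.drop lo.toNat).take (hi - lo).toNat).filter (fun v => v = "?")).length : Int)) := by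
  induction fuel with
  | zero =>
    intro vals lo hi hn hlo hhi
    have h0 : (hi - lo).toNat = 0 := by omega
    simp [pvMissing, h0]
  | succ f ih =>
    intro vals lo hi hn hlo hhi
    rw [pvMissing]
    by_cases h0 : hi - lo ≤ 0
    · have : (hi - lo).toNat = 0 := by omega
      simp [h0, this]
    · by_cases h1 : hi - lo = 1
      · have hn1 : (hi - lo).toNat = 1 := by omega
        have hlt : lo.toNat < vals.length := by omega
        have hget : PySem.List.pyGet? vals lo = some vals[lo.toNat] := by
          have hcast : lo = ((lo.toNat : Nat) : Int) := by omega
          have hq : PySem.List.pyGet? vals lo = vals[lo.toNat]? := by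
            rw [hcast, PySem.List.pyGet?_natCast]
            congr 1
          rw [hq, List.getElem?_eq_getElem hlt]
        have hdrop : vals.drop lo.toNat = vals[lo.toNat] :: vals.drop (lo.toNat + 1) :=
          List.drop_eq_getElem_cons hlt
        have htake : List.take 1 (List.drop lo.toNat vals) = [vals[lo.toNat]] := by
          rw [hdrop]
          rfl
        rw [if_neg h0, if_pos h1, hget, hn1, htake]
        by_cases hq : vals[lo.toNat] = "?"
        · simp [hq]
        · simp [hq]
      · -- recursive case: hi - lo ≥ 2
        have h2 : lo + 2 ≤ hi := by omega
        simp only [h0, h1, if_false]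
        have hmid : PySem.Int.floordiv (lo + hi) 2 = (lo + hi) / 2 :=
          PySem.Int.floordiv_eq_ediv_of_pos (by omega)
        rw [hmid]
        set mid := (lo + hi) / 2 with hmiddef
        have hb1 : lo + 1 ≤ mid := by omega
        have hb2 : mid + 1 ≤ hi := by omega
        set n1 := (mid - lo).toNat with hn1def
        set n2 := (hi - mid).toNat with hn2def
        have hsum : n1 + n2 = (hi - lo).toNat := by omega
        have e1 : pvMissing vals f lo mid
            = ((((vals.drop lo.toNat).take n1).filter (fun v => v = "?")).length : Int) :=
          ih vals lo mid (by omega) hlo (by omega)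
        have e2 : pvMissing vals f mid hi
            = ((((vals.drop mid.toNat).take n2).filter (fun v => v = "?")).length : Int) :=
          ih vals mid hi (by omega) (by omega) hhi
        have hdd : (vals.drop lo.toNat).drop n1 = vals.drop mid.toNat := by
          rw [List.drop_drop]
          congr 1
          omega
        have hsplit : (vals.drop lo.toNat).take (hi - lo).toNat
            = (vals.drop lo.toNat).take n1 ++ (vals.drop mid.toNat).take n2 := by
          rw [← hsum, List.take_add, hdd]
        rw [e1, e2, hsplit, List.filter_append, List.length_append]
        push_cast
        ring

-- The dual-counter fold computes (len - missing, missing) over the values.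
theorem foldl_count (l : List (String × String)) (a b : Int) :
    l.foldl (fun (acc : Int × Int) kv =>
        if kv.2 = "?" then (acc.1, acc.2 + 1) else (acc.1 + 1, acc.2)) (a, b)
      = (a + ((l.length : Int) - ((l.map Prod.snd).filter (fun v => v = "?")).length),
         b + ((l.map Prod.snd).filter (fun v => v = "?")).length) := by
  induction l generalizing a b with
  | nil => simp
  | cons hd tl ih =>
    by_cases h : hd.2 = "?"
    · simp only [List.foldl_cons, ih, List.map_cons, List.filter_cons, h, decide_true,
        if_true, List.length_cons, Prod.mk.injEq]
      refine ⟨?_, ?_⟩ <;> push_cast <;> ring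
    · simp only [List.foldl_cons, ih, List.map_cons, List.filter_cons, h, decide_false,
        if_false, List.length_cons, Prod.mk.injEq]
      refine ⟨?_, ?_⟩ <;> push_cast <;> ring

-- On the whole value list, the divide-and-conquer count is the '?' count of the list.
theorem pvMissing_full (vals : List String) :
    pvMissing vals vals.length 0 (vals.length : Int)
      = ((vals.filter (fun v => v = "?")).length : Int) := by
  have := pvMissing_eq vals.length vals 0 (vals.length : Int) (by omega) (by omega) (le_refl _)
  simpa using this

-- ===== VERDICT (by name: the statement is the Claim_ definition above) =====
theorem get_pin_count_spec : Claim_equal_get_pin_count := by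
  intro d _ hpre
  unfold Spec_get_pin_count get_pin_count get_pin_count_alt
  obtain ⟨hsome, hnd⟩ := hpre
  cases hlk : List.lookup "Facility Name" d with
  | none => simp [hlk] at hsome
  | some sub =>
    rw [hlk] at hnd
    simp only [Option.getD_some] at hnd
    have hcong : sub.foldl
        (fun (acc : Int × Int) kv =>
          if List.lookup kv.1 sub = some "?" then (acc.1, acc.2 + 1) else (acc.1 + 1, acc.2)) (0, 0)
      = sub.foldl
        (fun (acc : Int × Int) kv =>
          if kv.2 = "?" then (acc.1, acc.2 + 1) else (acc.1 + 1, acc.2)) (0, 0) := by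
      apply PySem.List.foldl_congr_mem
      intro acc kv hkv
      rw [lookup_of_mem_nodup sub hnd kv.1 kv.2 hkv]
      by_cases h : kv.2 = "?"
      · simp [h]
      · simp [h]
    dsimp only
    rw [hcong, foldl_count, pvMissing_full]
    simp
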